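-- pv_equiv track=rewrite | github.com/Strafos/messenger-analysis | message_analysis.py | count_messages
-- ===== SOURCE A (Python) =====
-- def count_messages(messages):
--     counters = {}
--     participants = set()
--     for message in messages:
--         sender = message["sender_name"]
--         participants.add(sender)
--         counters[sender] = 1 if sender not in counters else counters[sender] + 1
--     return sum(counters.values()) if len(participants) == 2 else 0
-- ===== SOURCE B (Python) =====
-- def count_messages(messages):
--     senders = [m["sender_name"] for m in messages]
--     if not senders:
--         return 0
--     a = senders[0]
--     b = next((s for s in senders if s != a), None)
--     if b is None:
--         return 0
--     return len(senders) if all(s == a or s == b for s in senders) else 0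
-- ===== Notes on version B (the rewrite author's own statement) =====
-- stated objective: alternative
-- what changed: B builds no hash structure at all: it extracts the sender list, picks the first sender and the first sender different from it, and verifies every sender is one of those two, returning len(messages) in that case (sum of A's per-sender counts equals the message count).
import Mathlib
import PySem

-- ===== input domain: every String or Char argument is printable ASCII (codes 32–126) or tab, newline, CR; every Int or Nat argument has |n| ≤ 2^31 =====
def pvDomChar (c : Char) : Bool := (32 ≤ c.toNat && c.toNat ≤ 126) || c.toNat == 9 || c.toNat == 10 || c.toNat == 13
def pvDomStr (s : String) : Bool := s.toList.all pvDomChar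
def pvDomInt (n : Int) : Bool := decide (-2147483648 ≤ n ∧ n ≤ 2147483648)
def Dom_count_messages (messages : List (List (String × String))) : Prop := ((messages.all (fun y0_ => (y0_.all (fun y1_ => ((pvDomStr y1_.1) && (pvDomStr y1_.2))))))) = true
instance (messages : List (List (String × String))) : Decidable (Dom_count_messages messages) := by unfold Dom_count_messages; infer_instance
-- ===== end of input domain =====

-- B builds no dict and no set: it finds the first two distinct senders and checks every
-- sender is one of them, returning the message count in that case (objective: alternative).

-- ===== PORT A =====
def count_messages (messages : List (List (String × String))) : Int :=
  let st := messages.foldl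
    (fun (st : PySem.Dict String Int × PySem.Set String) message =>
      -- message["sender_name"]: total form of the dict lookup, exact under Pre_
      let sender := ((PySem.Dict.ofList message).get? "sender_name").getD ""
      let participants := PySem.Set.add st.2 sender
      let counters := st.1.insert sender
        (if st.1.contains sender = false then (1 : Int) else st.1.getD sender 0 + 1)
      (counters, participants))
    (PySem.Dict.empty, PySem.Set.empty)
  if PySem.Set.len st.2 == 2 then st.1.values.sum else 0

-- ===== PORT B =====
def count_messages_alt (messages : List (List (String × String))) : Int :=
  -- senders = [m["sender_name"] for m in messages]  (same total lookup form, exact under Pre_)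
  let senders := messages.map (fun m => ((PySem.Dict.ofList m).get? "sender_name").getD "")
  match senders with
  | [] => 0                                   -- if not senders: return 0
  | a :: _ =>
    match senders.find? (fun s => !(s == a)) with   -- next((s for s in senders if s != a), None)
    | none => 0
    | some b =>
      if senders.all (fun s => s == a || s == b) then (senders.length : Int) else 0

-- ===== PRECONDITION & SPEC =====
-- Pre_ excludes exactly the inputs where message["sender_name"] raises KeyError in
-- both A and B: some message lacks the "sender_name" key.
def Pre_count_messages (messages : List (List (String × String))) : Prop :=
  (messages.all (fun m => m.any (fun p => p.1 == "sender_name"))) = true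
instance (messages : List (List (String × String))) : Decidable (Pre_count_messages messages) := by unfold Pre_count_messages; infer_instance

def pvWitness_count_messages : (List (List (String × String))) :=
  [[("sender_name", "alice")], [("sender_name", "bob")]]

def Spec_count_messages (messages : List (List (String × String))) (out : Int) : Prop := out = count_messages_alt messages
instance (messages : List (List (String × String))) (out : Int) : Decidable (Spec_count_messages messages out) := by unfold Spec_count_messages; infer_instance

-- ===== CLAIM (what is proved, stated in full; the proofs are below) =====
def Claim_equal_count_messages : Prop := ∀ (messages : List (List (String × String))), Dom_count_messages messages → Pre_count_messages messages → Spec_count_messages messages (count_messages messages)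

-- ===== LEMMAS AND PROOFS =====

def pvSender (m : List (String × String)) : String :=
  ((PySem.Dict.ofList m).get? "sender_name").getD ""

-- A's paired fold splits into the counters fold and the participants fold
theorem pvA_fold_split (l : List (List (String × String)))
    (d : PySem.Dict String Int) (s : PySem.Set String) :
    l.foldl
      (fun (st : PySem.Dict String Int × PySem.Set String) message =>
        (st.1.insert (pvSender message)
          (if st.1.contains (pvSender message) = false then (1 : Int)
           else st.1.getD (pvSender message) 0 + 1),
         PySem.Set.add st.2 (pvSender message))) (d, s)
    = (l.foldl (fun d m => d.insert (pvSender m)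
          (if d.contains (pvSender m) = false then (1 : Int) else d.getD (pvSender m) 0 + 1)) d,
       l.foldl (fun s m => PySem.Set.add s (pvSender m)) s) := by
  induction l generalizing d s with
  | nil => rfl
  | cons m t ih => simp [List.foldl_cons, ih]

-- A's counter-update branch is just "getD + 1"
theorem pvStep_eq (d : PySem.Dict String Int) (k : String) :
    d.insert k (if d.contains k = false then (1 : Int) else d.getD k 0 + 1)
    = d.insert k (d.getD k 0 + 1) := by
  by_cases h : d.contains k = false
  · rw [h, PySem.Dict.getD_of_not_contains d 0 h]; norm_num
  · simp [h]

-- A's counters fold is Counter(messages.map sender)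
theorem pvCounters_eq (l : List (List (String × String))) :
    l.foldl (fun d m => d.insert (pvSender m)
        (if d.contains (pvSender m) = false then (1 : Int) else d.getD (pvSender m) 0 + 1))
      PySem.Dict.empty
    = PySem.Dict.counter (l.map pvSender) := by
  have h : (fun (d : PySem.Dict String Int) (m : List (String × String)) =>
      d.insert (pvSender m)
        (if d.contains (pvSender m) = false then (1 : Int) else d.getD (pvSender m) 0 + 1))
      = fun d m => d.insert (pvSender m) (d.getD (pvSender m) 0 + 1) := by
    funext d m; exact pvStep_eq d (pvSender m)
  rw [h, ← List.foldl_map (f := pvSender) (g := fun (d : PySem.Dict String Int) x => d.insert x (d.getD x 0 + 1)),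
    PySem.Dict.foldl_insert_getD_add_one_eq_counter]

-- casting a mapped Nat sum to Int
theorem pvSum_cast (l : List String) (f : String → Nat) :
    (l.map (fun x => ((f x : Nat) : Int))).sum = ((l.map f).sum : Int) := by
  induction l with
  | nil => simp
  | cons a t ih => simp [ih]

-- the sum of Counter(ss)'s values is the length of ss
theorem pvCounter_sum (ss : List String) :
    (PySem.Dict.counter ss).values.sum = (ss.length : Int) := by
  have hitems := PySem.Dict.items_counter (κ := String) ss
  have hv : (PySem.Dict.counter ss).values
      = (PySem.Set.ofList ss).map (fun k => ((ss.count k : Nat) : Int)) := by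
    show ((PySem.Dict.counter ss).items).map (·.2) = _
    rw [hitems, List.map_map]; rfl
  rw [hv, pvSum_cast]
  have hperm : (PySem.Set.ofList ss).Perm ss.dedup := by
    rw [List.perm_ext_iff_of_nodup (PySem.Set.nodup_ofList ss) ss.nodup_dedup]
    intro a; rw [PySem.Set.mem_ofList, List.mem_dedup]
  rw [List.Perm.sum_eq (hperm.map _), List.sum_map_count_dedup_eq_length]

-- A reduced to a function of the sender list
theorem pvA_eq (messages : List (List (String × String))) :
    count_messages messages
    = (if PySem.Set.len (PySem.Set.ofList (messages.map pvSender)) == 2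
       then ((messages.map pvSender).length : Int) else 0) := by
  unfold count_messages
  rw [show (fun (st : PySem.Dict String Int × PySem.Set String) message =>
        let sender := ((PySem.Dict.ofList message).get? "sender_name").getD ""
        let participants := PySem.Set.add st.2 sender
        let counters := st.1.insert sender
          (if st.1.contains sender = false then (1 : Int) else st.1.getD sender 0 + 1)
        (counters, participants))
      = (fun (st : PySem.Dict String Int × PySem.Set String) message =>
        (st.1.insert (pvSender message)
          (if st.1.contains (pvSender message) = false then (1 : Int)
           else st.1.getD (pvSender message) 0 + 1),
         PySem.Set.add st.2 (pvSender message))) from rfl]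
  rw [pvA_fold_split, pvCounters_eq]
  have hset : messages.foldl (fun s m => PySem.Set.add s (pvSender m)) PySem.Set.empty
      = PySem.Set.ofList (messages.map pvSender) := by
    rw [PySem.Set.ofList_eq_foldl, List.foldl_map]
    rfl
  simp only [hset, pvCounter_sum, List.length_map]

-- B's branch structure, as a function of the extracted sender list (proof helper)
def pvAltOn (ss : List String) : Int :=
  match ss with
  | [] => 0
  | a :: _ =>
    match ss.find? (fun s => !(s == a)) with
    | none => 0
    | some b => if ss.all (fun s => s == a || s == b) then (ss.length : Int) else 0

theorem pvB_eq (messages : List (List (String × String))) :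
    count_messages_alt messages = pvAltOn (messages.map pvSender) := rfl

-- a nodup list whose members are exactly a and b (a ≠ b) has length 2
theorem pvLen_two {l : List String} (hnd : l.Nodup) (a b : String) (hab : a ≠ b)
    (ha : a ∈ l) (hb : b ∈ l) (hsub : ∀ x ∈ l, x = a ∨ x = b) : l.length = 2 := by
  have hcard : l.toFinset = {a, b} := by
    ext x
    simp only [List.mem_toFinset, Finset.mem_insert, Finset.mem_singleton]
    constructor
    · exact fun hx => hsub x hx
    · rintro (rfl | rfl) <;> assumption
  have := List.toFinset_card_of_nodup hnd
  rw [hcard, Finset.card_pair hab] at this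
  omega

-- the core equivalence, on the extracted sender list
theorem pvKey (ss : List String) :
    (if PySem.Set.len (PySem.Set.ofList ss) == 2 then (ss.length : Int) else 0)
    = pvAltOn ss := by
  match ss with
  | [] => rfl
  | a :: t =>
    have hmem : ∀ x, x ∈ PySem.Set.ofList (a :: t) ↔ x ∈ a :: t :=
      fun x => PySem.Set.mem_ofList _ x
    have hnd := PySem.Set.nodup_ofList (a :: t)
    unfold pvAltOn
    cases hf : (a :: t).find? (fun s => !(s == a)) with
    | none =>
      -- every sender equals a: the distinct-sender list is [a], length 1
      have hall : ∀ x ∈ a :: t, x = a := by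
        intro x hx
        have := List.find?_eq_none.mp hf x hx
        simpa using this
      have hone : PySem.Set.ofList (a :: t) = [a] := by
        have hsub : ∀ x ∈ PySem.Set.ofList (a :: t), x = a := fun x hx => hall x ((hmem x).mp hx)
        have hamem : a ∈ PySem.Set.ofList (a :: t) := (hmem a).mpr (by simp)
        cases hs : PySem.Set.ofList (a :: t) with
        | nil => rw [hs] at hamem; simp at hamem
        | cons y ys =>
          rw [hs] at hsub hnd
          have hy : y = a := hsub y (by simp)
          have hys : ys = [] := by
            cases ys with
            | nil => rfl
            | cons z zs =>
              have hz : z = a := hsub z (by simp)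
              subst hy hz
              simp at hnd
          rw [hy, hys]
      have hft : t.find? (fun s => !(s == a)) = none := by simpa using hf
      rw [hone]
      simp [PySem.Set.len, hft]
    | some b =>
      have hbmem : b ∈ a :: t := List.mem_of_find?_eq_some hf
      have hbne : b ≠ a := by
        have := List.find?_some hf
        simpa using this
      by_cases hall : (a :: t).all (fun s => s == a || s == b)
      · -- members are exactly {a, b}: length 2
        have hlen : (PySem.Set.ofList (a :: t)).length = 2 := by
          apply pvLen_two hnd a b (Ne.symm hbne)
          · exact (hmem a).mpr (by simp)
          · exact (hmem b).mpr hbmem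
          · intro x hx
            have := List.all_eq_true.mp hall x ((hmem x).mp hx)
            simpa using this
        have hft : t.find? (fun s => !(s == a)) = some b := by simpa using hf
        have hcond : ∀ x ∈ t, x = a ∨ x = b := by
          intro x hx
          have := List.all_eq_true.mp hall x (List.mem_cons_of_mem a hx)
          simpa using this
        simp [PySem.Set.len, hlen, hft]
        intro x hx h1 h2
        rcases hcond x hx with rfl | rfl
        · exact absurd rfl h1
        · exact absurd rfl h2
      · -- a third distinct sender exists: length ≥ 3
        have hex : ∃ c ∈ a :: t, ¬(c == a || c == b) = true := by
          simp only [List.all_eq_true, not_forall] at hall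
          obtain ⟨c, hc1, hc2⟩ := hall
          exact ⟨c, hc1, hc2⟩
        obtain ⟨c, hcmem, hcne⟩ := hex
        have hca : c ≠ a := by simp at hcne; exact hcne.1
        have hcb : c ≠ b := by simp at hcne; exact hcne.2
        have hlen : (PySem.Set.ofList (a :: t)).length ≠ 2 := by
          intro h2
          have hcard := List.toFinset_card_of_nodup hnd
          rw [h2] at hcard
          have hsub : ({a, b, c} : Finset String) ⊆ (PySem.Set.ofList (a :: t)).toFinset := by
            intro x hx
            rw [List.mem_toFinset, hmem]
            simp only [Finset.mem_insert, Finset.mem_singleton] at hx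
            rcases hx with rfl | rfl | rfl
            · simp
            · exact hbmem
            · exact hcmem
          have h3 : ({a, b, c} : Finset String).card = 3 := by
            rw [Finset.card_insert_of_notMem (by simp [hca.symm]; tauto),
              Finset.card_pair (Ne.symm hcb)]
          have := Finset.card_le_card hsub
          omega
        have hft : t.find? (fun s => !(s == a)) = some b := by simpa using hf
        have hct : c ∈ t := by
          rcases List.mem_cons.mp hcmem with rfl | h
          · exact absurd rfl hca
          · exact h
        have hcond : ¬ ∀ x ∈ t, x = a ∨ x = b := fun h => by
          rcases h c hct with rfl | rfl
          · exact hca rfl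
          · exact hcb rfl
        simp only [PySem.Set.len]
        rw [if_neg (by simpa using fun h => hlen (by exact_mod_cast h))]
        simp [hft, hcond]

-- ===== VERDICT (by name: the statement is the Claim_ definition above) =====
theorem count_messages_spec : Claim_equal_count_messages := by
  intro messages _ _
  show count_messages messages = count_messages_alt messages
  rw [pvA_eq, pvB_eq, ← pvKey, List.length_map]
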